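-- pv_equiv track=rewrite | github.com/bohaohan/mchack | testExtAndSum/extractor.py | group_quotes
-- ===== SOURCE A (Python) =====
-- def group_quotes(sentences):
--     # Quotes should be in a single sentence, even if there are periods in the quote.
--     new_list = []
--     skip = 0
--     for i in range(0, len(sentences)):
--         if skip > 0:
--             skip -= 1
--             continue
--         sentence = sentences[i]
--         while sentence.count("\"") % 2 == 1:
--             skip += 1
--             if i+skip >= len(sentences):
--                 break
--             if sentences[i+skip][0].isalnum():
--                 sentence += " " + sentences[i+skip]
--             else:
--                 sentence += sentences[i+skip]
--         new_list.append(sentence)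
--     return new_list
-- ===== SOURCE B (Python) =====
-- def group_quotes(sentences):
--     # Quotes should be in a single sentence, even if there are periods in the quote.
--     groups = []
--     open_quote = False
--     for sentence in sentences:
--         if open_quote:
--             if sentence[0].isalnum():
--                 groups[-1] += " " + sentence
--             else:
--                 groups[-1] += sentence
--         else:
--             groups.append(sentence)
--         if sentence.count('"') % 2 == 1:
--             open_quote = not open_quote
--     return groups
-- ===== Notes on version B (the rewrite author's own statement) =====
-- stated objective: simpler
-- what changed: Replaces A's indexed loop with a nested while and a skip counter by one flat pass that keeps a quote-parity flag and appends a continuation sentence onto the last group.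
import Mathlib
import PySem

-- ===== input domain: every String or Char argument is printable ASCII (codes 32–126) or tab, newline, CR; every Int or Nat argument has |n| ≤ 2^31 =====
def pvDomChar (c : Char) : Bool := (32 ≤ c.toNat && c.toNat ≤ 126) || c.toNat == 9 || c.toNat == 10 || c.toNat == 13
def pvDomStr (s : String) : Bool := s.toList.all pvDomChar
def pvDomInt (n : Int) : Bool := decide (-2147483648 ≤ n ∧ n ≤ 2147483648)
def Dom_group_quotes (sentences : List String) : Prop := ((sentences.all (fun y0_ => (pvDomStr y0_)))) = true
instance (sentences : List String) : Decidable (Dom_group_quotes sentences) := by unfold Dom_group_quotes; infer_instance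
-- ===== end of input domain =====

-- B replaces A's indexed loop + nested while + skip counter by one flat pass with a quote-parity flag (simpler decomposition, same cost).


-- shared transliterations of expressions both Pythons contain verbatim:
-- sentence.count("\"") % 2 == 1
def qOdd (s : String) : Bool := PySem.Str.count s "\"" % 2 == 1
-- x[0].isalnum(); x[0] raises IndexError on x = "" (excluded by Pre_); the default ' ' is never alnum
def pyFirstAlnum (x : String) : Bool := PySem.Chars.isalnum ((PySem.Str.pyGet? x 0).getD ' ')

-- ===== PORT A =====
-- the inner 'while sentence.count("\"") % 2 == 1' loop; returns (sentence, skip)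
def groupA_while (sentences : List String) (i : Nat) (sentence : String) (skip : Nat) : String × Nat :=
  if qOdd sentence = true then
    if h : sentences.length ≤ i + (skip + 1) then (sentence, skip + 1)
    else
      groupA_while sentences i
        (if pyFirstAlnum (sentences.getD (i + (skip + 1)) "") = true
          then sentence ++ " " ++ sentences.getD (i + (skip + 1)) ""
          else sentence ++ sentences.getD (i + (skip + 1)) "")
        (skip + 1)
  else (sentence, skip)
termination_by sentences.length - (i + skip)
decreasing_by omega

-- the outer 'for i in range(0, len(sentences))' loop with the skip counter
def groupA_loop (sentences : List String) (i : Nat) (skip : Nat) (new_list : List String) : List String :=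
  if i < sentences.length then
    if 0 < skip then groupA_loop sentences (i + 1) (skip - 1) new_list
    else
      let p := groupA_while sentences i (sentences.getD i "") 0
      groupA_loop sentences (i + 1) p.2 (new_list ++ [p.1])
  else new_list
termination_by sentences.length - i
decreasing_by all_goals omega

def group_quotes (sentences : List String) : List String :=
  groupA_loop sentences 0 0 []

-- ===== PORT B =====
-- single flat pass; open_quote is the parity flag, continuation glued onto the last group
def groupB_loop : List String → Bool → List String → List String
  | [], _, groups => groups
  | sentence :: rest, openQ, groups =>
    groupB_loop rest
      (if qOdd sentence = true then !openQ else openQ)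
      (if openQ then
        groups.dropLast ++ [groups.getLastD "" ++
          (if pyFirstAlnum sentence = true then " " ++ sentence else sentence)]
      else groups ++ [sentence])

def group_quotes_alt (sentences : List String) : List String :=
  groupB_loop sentences false []

-- ===== PRECONDITION & SPEC =====
-- Pre_ excludes exactly the inputs on which Python A raises IndexError: an empty sentence reached
-- while a quote is open, i.e. an empty sentence preceded by an odd total number of '"' characters.
def Pre_group_quotes (sentences : List String) : Prop :=
  ∀ i, i < sentences.length → sentences.getD i "" = "" →
    (((sentences.take i).map (fun s => PySem.Str.count s "\"")).sum) % 2 = 0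
instance (sentences : List String) : Decidable (Pre_group_quotes sentences) := by
  unfold Pre_group_quotes; infer_instance

def pvWitness_group_quotes : List String := ["\"He said.", "go.\"", "done"]

def Spec_group_quotes (sentences : List String) (out : List String) : Prop := out = group_quotes_alt sentences
instance (sentences : List String) (out : List String) : Decidable (Spec_group_quotes sentences out) := by unfold Spec_group_quotes; infer_instance

-- ===== CLAIM (what is proved, stated in full; the proofs are below) =====
def Claim_equal_group_quotes : Prop := ∀ (sentences : List String), Dom_group_quotes sentences → Pre_group_quotes sentences → Spec_group_quotes sentences (group_quotes sentences)

-- ===== LEMMAS AND PROOFS =====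

-- the common functional specification: a group is closed by consuming sentences while parity is odd
def closeG : String → List String → String × List String
  | s, l =>
    if qOdd s = true then
      match l with
      | [] => (s, [])
      | x :: xs => closeG (if pyFirstAlnum x = true then s ++ " " ++ x else s ++ x) xs
    else (s, l)
termination_by _ l => l.length

lemma closeG_cons (s x : String) (xs : List String) (h : qOdd s = true) :
    closeG s (x :: xs) = closeG (if pyFirstAlnum x = true then s ++ " " ++ x else s ++ x) xs := by
  rw [closeG.eq_def]; simp [h]

lemma closeG_of_odd_nil (s : String) (h : qOdd s = true) : closeG s [] = (s, []) := by
  rw [closeG.eq_def]; simp [h]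

lemma closeG_of_even (s : String) (l : List String) (h : ¬ qOdd s = true) :
    closeG s l = (s, l) := by
  rw [closeG.eq_def]; simp [h]

lemma closeG_snd_length (s : String) (l : List String) : (closeG s l).2.length ≤ l.length := by
  induction s, l using closeG.induct with
  | case1 s h => simp [closeG_of_odd_nil s h]
  | case2 s h x xs ih =>
    rw [closeG_cons s x xs h]
    simp only [dite_eq_ite] at ih
    exact le_trans ih (by simp)
  | case3 s l h => simp [closeG_of_even s l h]

def specG : List String → List String
  | [] => []
  | s :: rest =>
    (closeG s rest).1 :: specG (closeG s rest).2
termination_by l => l.length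
decreasing_by
  have := closeG_snd_length s rest
  simp; omega

-- ---- A = specG ----

lemma groupA_while_eq_closeG (sentences : List String) (i : Nat) :
    ∀ (sent : String) (skip : Nat),
      closeG sent (sentences.drop (i + skip + 1)) =
        ((groupA_while sentences i sent skip).1,
          sentences.drop (i + (groupA_while sentences i sent skip).2 + 1)) := by
  intro sent skip
  induction sent, skip using groupA_while.induct sentences i with
  | case1 sent skip h hlen =>
    rw [groupA_while]
    have hnil : sentences.drop (i + skip + 1) = [] := List.drop_eq_nil_of_le (by omega)
    have hnil2 : sentences.drop (i + (skip + 1) + 1) = [] := List.drop_eq_nil_of_le (by omega)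
    rw [hnil, closeG_of_odd_nil sent h]
    simp [h, hlen, hnil2]
  | case2 sent skip h hlen ih =>
    rw [groupA_while]
    have hlt : i + skip + 1 < sentences.length := by omega
    have hj : i + (skip + 1) = i + skip + 1 := rfl
    have hgetD : sentences.getD (i + skip + 1) "" = sentences[i + skip + 1] :=
      List.getD_eq_getElem _ _ hlt
    simp only [hj, dite_eq_ite] at ih ⊢
    simp only [h, if_true]
    rw [if_neg (show ¬ sentences.length ≤ i + skip + 1 by omega)]
    rw [hgetD] at ih ⊢
    rw [List.drop_eq_getElem_cons hlt, closeG_cons _ _ _ h]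
    exact ih
  | case3 sent skip h =>
    rw [groupA_while]
    rw [closeG_of_even sent _ h]
    simp [h]

lemma groupA_loop_skip (sentences : List String) :
    ∀ (k i : Nat) (acc : List String),
      groupA_loop sentences i k acc = groupA_loop sentences (i + k) 0 acc := by
  intro k
  induction k with
  | zero => intro i acc; rfl
  | succ k ih =>
    intro i acc
    rw [groupA_loop]
    by_cases h : i < sentences.length
    · rw [if_pos h, if_pos (Nat.succ_pos k), Nat.add_sub_cancel]
      rw [ih (i + 1) acc]
      have h2 : i + 1 + k = i + (k + 1) := by omega
      rw [h2]
    · rw [if_neg h]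
      rw [groupA_loop]
      rw [if_neg (show ¬ (i + (k + 1) < sentences.length) by omega)]

lemma groupA_loop_eq_specG (sentences : List String) :
    ∀ (n i : Nat) (acc : List String), sentences.length - i ≤ n →
      groupA_loop sentences i 0 acc = acc ++ specG (sentences.drop i) := by
  intro n
  induction n with
  | zero =>
    intro i acc hn
    rw [groupA_loop]
    have h : ¬ (i < sentences.length) := by omega
    rw [List.drop_eq_nil_of_le (by omega)]
    simp [h, specG]
  | succ n ih =>
    intro i acc hn
    rw [groupA_loop]
    by_cases h : i < sentences.length
    · simp only [h, if_pos, Nat.lt_irrefl, if_false]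
      have hgetD : sentences.getD i "" = sentences[i] := List.getD_eq_getElem _ _ h
      have hdrop : sentences.drop i = sentences[i] :: sentences.drop (i + 1) :=
        List.drop_eq_getElem_cons h
      set p := groupA_while sentences i (sentences.getD i "") 0 with hp
      have hw := groupA_while_eq_closeG sentences i (sentences.getD i "") 0
      simp only [Nat.add_zero, ← hp] at hw
      rw [groupA_loop_skip sentences p.2 (i + 1) (acc ++ [p.1])]
      rw [ih (i + 1 + p.2) (acc ++ [p.1]) (by omega)]
      rw [hdrop]
      show acc ++ [p.1] ++ specG (sentences.drop (i + 1 + p.2)) =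
        acc ++ specG (sentences[i] :: sentences.drop (i + 1))
      rw [specG, ← hgetD, hw]
      have : i + p.2 + 1 = i + 1 + p.2 := by omega
      rw [this]
      simp
    · simp only [h, if_neg, if_false]
      rw [List.drop_eq_nil_of_le (by omega)]
      simp [specG]

-- ---- B = specG ----

lemma qOdd_toList_count (s : String) : qOdd s = (s.toList.count '"' % 2 == 1) := by
  have go1 : ∀ (fuel : Nat) (cs : List Char) (acc : Nat), cs.length ≤ fuel →
      PySem.Chars.count.go ['"'] fuel cs acc = acc + cs.count '"' := by
    intro fuel
    induction fuel with
    | zero =>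
      intro cs acc hcs
      have : cs = [] := List.eq_nil_of_length_eq_zero (by omega)
      subst this
      simp [PySem.Chars.count.go]
    | succ fuel ih =>
      intro cs acc hcs
      cases cs with
      | nil => simp [PySem.Chars.count.go]
      | cons h t =>
        rw [PySem.Chars.count.go]
        by_cases hc : h = '"'
        · subst hc
          have hpre : List.isPrefixOf ['"'] ('"' :: t) = true := by
            simp [List.isPrefixOf]
          simp only [hpre, if_pos, List.length_cons, List.length_nil,
            List.drop_succ_cons, List.drop_zero]
          rw [ih t (acc + 1) (by simpa using hcs)]
          have hcnt : List.count '"' ('"' :: t) = List.count '"' t + 1 := by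
            simp [List.count_cons]
          rw [hcnt]
          omega
        · have hpre : List.isPrefixOf ['"'] (h :: t) = false := by
            simp only [List.isPrefixOf, List.isPrefixOf_nil_left, Bool.and_true,
              beq_eq_false_iff_ne, ne_eq]
            exact fun hh => absurd hh.symm hc
          simp only [hpre, Bool.false_eq_true, if_false]
          rw [ih t acc (by simpa using hcs)]
          have hcnt : List.count '"' (h :: t) = List.count '"' t := by
            simp [List.count_cons, hc]
          rw [hcnt]
  unfold qOdd PySem.Str.count PySem.Chars.count
  have : ("\"").toList = ['"'] := rfl
  rw [this]
  simp only [List.isEmpty_cons, Bool.false_eq_true, if_false]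
  rw [go1 s.toList.length s.toList 0 (le_refl _)]
  simp

lemma qOdd_glue (m x : String) (hm : qOdd m = true) :
    qOdd (if pyFirstAlnum x = true then m ++ " " ++ x else m ++ x) = !(qOdd x) := by
  have hsp : (" " : String).toList.count '"' = 0 := rfl
  rw [qOdd_toList_count] at hm ⊢
  rw [qOdd_toList_count x]
  split_ifs with h
  · simp only [String.toList_append, List.count_append, hsp]
    simp only [beq_iff_eq] at hm ⊢
    rcases Nat.mod_two_eq_zero_or_one (x.toList.count '"') with hx | hx <;>
      simp [Nat.add_mod, hm, hx]
  · simp only [String.toList_append, List.count_append]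
    simp only [beq_iff_eq] at hm ⊢
    rcases Nat.mod_two_eq_zero_or_one (x.toList.count '"') with hx | hx <;>
      simp [Nat.add_mod, hm, hx]

lemma groupB_loop_spec (l : List String) :
    (∀ acc, groupB_loop l false acc = acc ++ specG l) ∧
    (∀ acc m, qOdd m = true →
      groupB_loop l true (acc ++ [m]) = acc ++ (closeG m l).1 :: specG (closeG m l).2) := by
  induction l with
  | nil =>
    constructor
    · intro acc; simp [groupB_loop, specG]
    · intro acc m hm
      rw [groupB_loop, closeG_of_odd_nil m hm]
      simp [specG]
  | cons x xs ih =>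
    constructor
    · intro acc
      rw [groupB_loop]
      simp only [Bool.false_eq_true, if_false, Bool.not_false]
      rw [specG]
      by_cases hx : qOdd x = true
      · simp only [hx, if_true]
        rw [ih.2 acc x hx]
      · simp only [hx, Bool.false_eq_true, if_false]
        rw [ih.1 (acc ++ [x])]
        rw [closeG_of_even x xs hx]
        simp
    · intro acc m hm
      rw [groupB_loop]
      simp only [if_true]
      have hdl : (acc ++ [m]).dropLast = acc := by simp
      have hgl : (acc ++ [m]).getLastD "" = m := by simp
      rw [hdl, hgl]
      set m' := m ++ (if pyFirstAlnum x = true then " " ++ x else x) with hm'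
      have hm'e : m' = if pyFirstAlnum x = true then m ++ " " ++ x else m ++ x := by
        rw [hm']; split_ifs <;> simp [String.append_assoc]
      have hpar : qOdd m' = !(qOdd x) := by rw [hm'e]; exact qOdd_glue m x hm
      have hclose : closeG m (x :: xs) = closeG m' xs := by
        rw [closeG_cons m x xs hm, hm'e]
      rw [hclose]
      by_cases hx : qOdd x = true
      · simp only [hx, if_true, Bool.not_true]
        rw [ih.1 (acc ++ [m'])]
        have hmf : ¬ qOdd m' = true := by rw [hpar, hx]; simp
        rw [closeG_of_even m' xs hmf]
        simp
      · simp only [hx, Bool.false_eq_true, if_false]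
        have : qOdd m' = true := by rw [hpar]; simp [hx]
        rw [ih.2 acc m' this]

-- ===== VERDICT (by name: the statement is the Claim_ definition above) =====
theorem group_quotes_spec : Claim_equal_group_quotes := by
  intro sentences _ _
  unfold Spec_group_quotes group_quotes group_quotes_alt
  rw [groupA_loop_eq_specG sentences sentences.length 0 [] (by omega)]
  rw [(groupB_loop_spec sentences).1 []]
  simp
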